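-- pv_equiv track=rewrite | github.com/poojithayadavalli/Stack | numberof nonincreasingsubsequences.py | countNonIncreasing
-- ===== SOURCE A (Python) =====
-- def countNonIncreasing(arr, n):
--     cnt = 0
--     len1 = 1
--     for i in range(n-1):
--         if (arr[i + 1] <= arr[i]):
--             len1 += 1
--         else:
--             cnt += (((len1 + 1) * len1) // 2)
--             len1 = 1
--     if (len1 > 1):
--         cnt += (((len1 + 1) * len1) // 2)
--     elif len1==1:
--         cnt+=1
--     return cnt
-- ===== SOURCE B (Python) =====
-- def countNonIncreasing(arr, n):
--     # Count, for each index, the non-increasing runs ending there; sum them.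
--     total = 0
--     run = 0
--     for i in range(n):
--         if i > 0 and arr[i] <= arr[i - 1]:
--             run += 1
--         else:
--             run = 1
--         total += run
--     return total
-- ===== Notes on version B (the rewrite author's own statement) =====
-- stated objective: simpler
-- what changed: B counts, for each index, the length of the non-increasing run ending there and adds it to a running total, instead of A's run-segmentation with explicit triangular-number formulas at each run boundary and a final two-branch flush.
-- intended difference: For n = 0 (no elements selected) A returns 1 because its leftover len1==1 branch fires, while B returns 0, the correct count of non-increasing subsequences of an empty selection. — e.g. on countNonIncreasing([], 0): A returns 1, B returns 0
-- outside the precondition, e.g. on countNonIncreasing([5], -1): A returns 1, B returns 0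
import Mathlib
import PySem

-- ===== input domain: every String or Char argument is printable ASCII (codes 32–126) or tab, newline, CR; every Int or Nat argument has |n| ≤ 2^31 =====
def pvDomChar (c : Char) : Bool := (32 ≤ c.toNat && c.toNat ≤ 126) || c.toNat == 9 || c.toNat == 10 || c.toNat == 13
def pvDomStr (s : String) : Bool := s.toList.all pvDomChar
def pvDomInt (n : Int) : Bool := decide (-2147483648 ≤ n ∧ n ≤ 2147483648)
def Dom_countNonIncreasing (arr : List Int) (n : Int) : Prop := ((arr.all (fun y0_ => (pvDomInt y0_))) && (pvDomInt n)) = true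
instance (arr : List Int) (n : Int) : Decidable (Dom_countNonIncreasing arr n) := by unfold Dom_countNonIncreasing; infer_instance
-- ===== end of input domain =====

-- B replaces A's run-segmentation with triangular numbers by a per-index running-run count (simpler); B correctly returns 0 (not A's 1) when n ≤ 0.

-- ===== PORT A =====
-- triangular term (len1+1)*len1 // 2 as A writes it
def triA (x : Int) : Int := PySem.Int.floordiv ((x + 1) * x) 2

-- loop body of A; indexing uses pyGetD (Pre_ keeps every access in range, where Python's arr[i] returns)
def stepA (arr : List Int) (p : Int × Int) (i : Int) : Int × Int :=
  if PySem.List.pyGetD arr (i + 1) 0 ≤ PySem.List.pyGetD arr i 0 then (p.1, p.2 + 1)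
  else (p.1 + triA p.2, 1)

def countNonIncreasing (arr : List Int) (n : Int) : Int :=
  let s := (PySem.List.pyRange 0 (n - 1) 1).foldl (stepA arr) (0, 1)
  if 1 < s.2 then s.1 + triA s.2
  else if s.2 = 1 then s.1 + 1
  else s.1

-- ===== PORT B =====
-- loop body of B: run = current non-increasing run length ending at i, added to the total
def stepB (arr : List Int) (p : Int × Int) (i : Int) : Int × Int :=
  let run := if 0 < i ∧ PySem.List.pyGetD arr i 0 ≤ PySem.List.pyGetD arr (i - 1) 0 then p.2 + 1 else 1
  (p.1 + run, run)

def countNonIncreasing_alt (arr : List Int) (n : Int) : Int :=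
  ((PySem.List.pyRange 0 n 1).foldl (stepB arr) (0, 0)).1

-- ===== PRECONDITION & SPEC =====
-- Pre_ keeps the natural domain of a count parameter: 0 ≤ n, and n small enough that the loops'
-- index accesses are in range (neither program touches arr when n ≤ 1). For n beyond that both A
-- and B raise IndexError; for negative n (a count outside the natural domain) A's leftover-run
-- branch returns 1 while B returns 0.
def Pre_countNonIncreasing (arr : List Int) (n : Int) : Prop := 0 ≤ n ∧ (n ≤ (arr.length : Int) ∨ n ≤ 1)
instance (arr : List Int) (n : Int) : Decidable (Pre_countNonIncreasing arr n) := by unfold Pre_countNonIncreasing; infer_instance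
def pvWitness_countNonIncreasing : List Int × Int := ([2, 1, 3], 3)

-- For n = 0 (no elements selected) A returns 1 because its leftover len1 == 1 branch fires, while B returns 0,
-- the correct count of non-increasing subsequences of an empty selection.
def D_countNonIncreasing (arr : List Int) (n : Int) : Prop := n = 0
instance (arr : List Int) (n : Int) : Decidable (D_countNonIncreasing arr n) := by unfold D_countNonIncreasing; infer_instance

def Spec_countNonIncreasing (arr : List Int) (n : Int) (out : Int) : Prop := ¬ D_countNonIncreasing arr n → out = countNonIncreasing_alt arr n
instance (arr : List Int) (n : Int) (out : Int) : Decidable (Spec_countNonIncreasing arr n out) := by unfold Spec_countNonIncreasing; infer_instance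

def pvDiffWitness_countNonIncreasing : List Int × Int := ([], 0)
def pvDiffWitnessOut_countNonIncreasing : Int × Int := (1, 0)

-- ===== CLAIM (what is proved, stated in full; the proofs are below) =====
def Claim_unchanged_countNonIncreasing : Prop := ∀ (arr : List Int) (n : Int), Dom_countNonIncreasing arr n → Pre_countNonIncreasing arr n → Spec_countNonIncreasing arr n (countNonIncreasing arr n)
def Claim_changed_countNonIncreasing : Prop := Dom_countNonIncreasing (pvDiffWitness_countNonIncreasing.1) (pvDiffWitness_countNonIncreasing.2) ∧ Pre_countNonIncreasing (pvDiffWitness_countNonIncreasing.1) (pvDiffWitness_countNonIncreasing.2) ∧ D_countNonIncreasing (pvDiffWitness_countNonIncreasing.1) (pvDiffWitness_countNonIncreasing.2) ∧ countNonIncreasing (pvDiffWitness_countNonIncreasing.1) (pvDiffWitness_countNonIncreasing.2) = pvDiffWitnessOut_countNonIncreasing.1 ∧ countNonIncreasing_alt (pvDiffWitness_countNonIncreasing.1) (pvDiffWitness_countNonIncreasing.2) = pvDiffWitnessOut_countNonIncreasing.2 ∧ pvDiffWitnessOut_countNonIncreasing.1 ≠ pvDiffWitnessOut_countNonIncrea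sing.2
def Claim_exact_countNonIncreasing : Prop := ∀ (arr : List Int) (n : Int), Dom_countNonIncreasing arr n → Pre_countNonIncreasing arr n → D_countNonIncreasing arr n → countNonIncreasing arr n ≠ countNonIncreasing_alt arr n

-- ===== LEMMAS AND PROOFS =====

lemma triA_succ (x : Int) (_hx : 0 ≤ x) : triA (x + 1) = triA x + (x + 1) := by
  simp only [triA, PySem.Int.floordiv_eq_ediv_of_pos (by norm_num : (0:Int) < 2)]
  have h1 : (x + 1 + 1) * (x + 1) = (x + 1) * x + 2 * (x + 1) := by ring
  have h2 : ∀ y : Int, (y + 2 * (x + 1)) / 2 = y / 2 + (x + 1) := fun y => by omega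
  rw [h1, h2]

-- invariant: after k+1 steps of B and k steps of A, B.run = A.len1 ≥ 1 and B.total = A.cnt + triA A.len1
lemma loop_inv (arr : List Int) (k : Nat) :
    ((PySem.List.pyRange 0 ((k : Int) + 1) 1).foldl (stepB arr) (0, 0)).2
      = ((PySem.List.pyRange 0 (k : Int) 1).foldl (stepA arr) (0, 1)).2
    ∧ ((PySem.List.pyRange 0 ((k : Int) + 1) 1).foldl (stepB arr) (0, 0)).1
      = ((PySem.List.pyRange 0 (k : Int) 1).foldl (stepA arr) (0, 1)).1
        + triA ((PySem.List.pyRange 0 (k : Int) 1).foldl (stepA arr) (0, 1)).2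
    ∧ 1 ≤ ((PySem.List.pyRange 0 (k : Int) 1).foldl (stepA arr) (0, 1)).2 := by
  induction k with
  | zero =>
      rw [show ((0 : Nat) : Int) = 0 from rfl]
      rw [PySem.List.pyRange_one_eq_nil (le_refl (0 : Int)), PySem.List.pyRange_one_singleton]
      simp only [List.foldl_cons, List.foldl_nil, stepB]
      norm_num [triA, PySem.Int.floordiv]
  | succ k ih =>
      obtain ⟨h2, h1, hpos⟩ := ih
      have hk : (0 : Int) ≤ (k : Int) := Int.natCast_nonneg k
      push_cast
      have hB' : (PySem.List.pyRange 0 ((k : Int) + 1 + 1) 1).foldl (stepB arr) (0, 0)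
          = stepB arr ((PySem.List.pyRange 0 ((k : Int) + 1) 1).foldl (stepB arr) (0, 0)) ((k : Int) + 1) := by
        rw [PySem.List.pyRange_one_succ_right (by omega : (0 : Int) ≤ (k : Int) + 1), List.foldl_append]
        simp only [List.foldl_cons, List.foldl_nil]
      have hA' : (PySem.List.pyRange 0 ((k : Int) + 1) 1).foldl (stepA arr) (0, 1)
          = stepA arr ((PySem.List.pyRange 0 (k : Int) 1).foldl (stepA arr) (0, 1)) (k : Int) := by
        rw [PySem.List.pyRange_one_succ_right hk, List.foldl_append]
        simp only [List.foldl_cons, List.foldl_nil]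
      rw [hB', hA']
      set a := (PySem.List.pyRange 0 (k : Int) 1).foldl (stepA arr) (0, 1) with ha
      set b := (PySem.List.pyRange 0 ((k : Int) + 1) 1).foldl (stepB arr) (0, 0) with hb
      have hidx : (k : Int) + 1 - 1 = (k : Int) := by ring
      simp only [stepA, stepB, hidx]
      by_cases hc : PySem.List.pyGetD arr ((k : Int) + 1) 0 ≤ PySem.List.pyGetD arr (k : Int) 0
      · have hcb : (0 < (k : Int) + 1 ∧
            PySem.List.pyGetD arr ((k : Int) + 1) 0 ≤ PySem.List.pyGetD arr (k : Int) 0) :=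
          ⟨by omega, hc⟩
        rw [if_pos hc, if_pos hcb]
        refine ⟨by rw [h2], ?_, by simp only []; omega⟩
        simp only [h1, h2]
        rw [triA_succ a.2 (by omega)]
        ring
      · have hcb : ¬ (0 < (k : Int) + 1 ∧
            PySem.List.pyGetD arr ((k : Int) + 1) 0 ≤ PySem.List.pyGetD arr (k : Int) 0) :=
          fun h => hc h.2
        rw [if_neg hc, if_neg hcb]
        refine ⟨rfl, ?_, by norm_num⟩
        simp only [h1]
        have ht : triA 1 = 1 := by decide
        rw [ht]

lemma agree_pos (arr : List Int) (n : Int) (hn : 1 ≤ n) :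
    countNonIncreasing arr n = countNonIncreasing_alt arr n := by
  obtain ⟨k, hk⟩ : ∃ k : Nat, n = (k : Int) + 1 := by
    refine ⟨(n - 1).toNat, ?_⟩; omega
  subst hk
  obtain ⟨h2, h1, hpos⟩ := loop_inv arr k
  simp only [countNonIncreasing, countNonIncreasing_alt]
  have hkn : (k : Int) + 1 - 1 = (k : Int) := by ring
  rw [hkn, h1]
  set a := (PySem.List.pyRange 0 (k : Int) 1).foldl (stepA arr) (0, 1) with ha
  rcases lt_or_eq_of_le hpos with h | h
  · rw [if_pos h]
  · rw [if_neg (by omega), if_pos h.symm, ← h]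
    have : triA 1 = 1 := by decide
    rw [this]

-- ===== VERDICT (by name: the statement is the Claim_ definition above) =====
theorem countNonIncreasing_spec : Claim_unchanged_countNonIncreasing := by
  intro arr n _ hPre hD
  exact agree_pos arr n (by unfold Pre_countNonIncreasing at hPre; unfold D_countNonIncreasing at hD; omega)

theorem countNonIncreasing_changed : Claim_changed_countNonIncreasing := by
  unfold Claim_changed_countNonIncreasing; decide

theorem countNonIncreasing_tight : Claim_exact_countNonIncreasing := by
  intro arr n _ _ hD
  unfold D_countNonIncreasing at hD
  have hA : countNonIncreasing arr n = 1 := by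
    unfold countNonIncreasing
    rw [PySem.List.pyRange_one_eq_nil (by omega : n - 1 ≤ 0)]
    norm_num
  have hB : countNonIncreasing_alt arr n = 0 := by
    unfold countNonIncreasing_alt
    rw [PySem.List.pyRange_one_eq_nil (by omega : n ≤ 0)]
    rfl
  rw [hA, hB]; norm_num
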